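-- pv_equiv track=rewrite | github.com/Suvetha03/square-shift-coding | helper_functions.py | orderSeating
-- ===== SOURCE A (Python) =====
-- import math
--
-- def isPrime(n):
--     if n == 1:
--         return 0
--     k = math.ceil(n**0.5)
--     for i in range(2, k+1):
--         if n % i == 0:
--             return 0
--     return 1
--
-- def isPowerOfTwo(n):
--     return n & (n - 1)
--
-- def orderSeating(seating):
--     prime = []
--     power_of_2 = []
--     other_ids = []
--     for id in seating:
--         if isPrime(id) == 1:
--             prime.append(id)
--         elif isPowerOfTwo(id) == 0 and id != 2:
--             power_of_2.append(id)
--         else: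
--             other_ids.append(id)
--     new_seating = prime
--     new_seating.extend(power_of_2)
--     new_seating.extend(other_ids)
--     return new_seating
-- ===== SOURCE B (Python) =====
-- import math
--
-- def isPrime(n):
--     if n == 1:
--         return 0
--     k = math.ceil(n**0.5)
--     for i in range(2, k+1):
--         if n % i == 0:
--             return 0
--     return 1
--
-- def isPowerOfTwo(n):
--     return n & (n - 1)
--
-- def rank(id):
--     if isPrime(id) == 1:
--         return 0
--     if isPowerOfTwo(id) == 0 and id != 2:
--         return 1
--     return 2
--
-- def orderSeating(seating):
--     return sorted(seating, key=rank)
-- ===== Notes on version B (the rewrite author's own statement) =====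
-- stated objective: idiomatic
-- what changed: Replaces the three explicit buckets and manual concatenation with a single stable sorted(seating, key=rank) where rank encodes A's branch order as 0/1/2.
-- outside the precondition, e.g. on orderSeating([-3]): A raises TypeError, B raises TypeError
import Mathlib
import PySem

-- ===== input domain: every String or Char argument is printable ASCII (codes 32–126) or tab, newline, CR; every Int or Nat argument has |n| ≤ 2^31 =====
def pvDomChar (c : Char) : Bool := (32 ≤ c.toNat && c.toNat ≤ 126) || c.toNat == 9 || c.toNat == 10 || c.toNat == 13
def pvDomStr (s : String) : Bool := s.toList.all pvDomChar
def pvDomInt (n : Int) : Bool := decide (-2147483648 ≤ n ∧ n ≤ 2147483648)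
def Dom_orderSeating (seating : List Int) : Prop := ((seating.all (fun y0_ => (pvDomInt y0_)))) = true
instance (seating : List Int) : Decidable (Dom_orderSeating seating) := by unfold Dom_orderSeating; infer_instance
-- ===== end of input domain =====

-- B replaces A's three explicit buckets + concatenation by one stable sort on a 0/1/2 rank key (idiomatic).
-- Pre_ excludes lists with a negative id, on which Python's A raises TypeError (complex sqrt fed to math.ceil).


-- ===== PORT A =====
-- isPrime: k = math.ceil(n**0.5) is written in its exact integer form for the admitted inputs
-- (0 ≤ n ≤ 2^31, where the double sqrt rounds to no wrong integer): 0 for n ≤ 0, isqrt(n-1)+1 otherwise.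
def isPrimeA (n : Int) : Int :=
  if n = 1 then 0
  else
    let k : Int := if n ≤ 0 then 0 else ((n - 1).toNat.sqrt : Int) + 1
    -- for i in range(2, k+1): if n % i == 0: return 0 / return 1
    if (PySem.List.pyRange 2 (k + 1) 1).any (fun i => PySem.Int.mod n i == 0) then 0 else 1

def isPowerOfTwoA (n : Int) : Int := PySem.Int.band n (n - 1)

def orderSeating (seating : List Int) : List Int :=
  let r := seating.foldl
    (fun (acc : List Int × List Int × List Int) id =>
      if isPrimeA id = 1 then (acc.1 ++ [id], acc.2.1, acc.2.2)
      else if isPowerOfTwoA id = 0 ∧ id ≠ 2 then (acc.1, acc.2.1 ++ [id], acc.2.2)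
      else (acc.1, acc.2.1, acc.2.2 ++ [id]))
    ([], [], [])
  r.1 ++ r.2.1 ++ r.2.2

-- ===== PORT B =====
def rankB (id : Int) : Int :=
  if isPrimeA id = 1 then 0
  else if isPowerOfTwoA id = 0 ∧ id ≠ 2 then 1
  else 2

def orderSeating_alt (seating : List Int) : List Int :=
  PySem.List.sorted seating rankB false

-- ===== PRECONDITION & SPEC =====
-- Pre_ excludes exactly the lists containing a negative id: there Python's isPrime computes n**0.5 as a
-- complex number and math.ceil raises TypeError (B's sorted key raises identically).
def Pre_orderSeating (seating : List Int) : Prop := (seating.all (fun x => decide (0 ≤ x))) = true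
instance (seating : List Int) : Decidable (Pre_orderSeating seating) := by unfold Pre_orderSeating; infer_instance
def pvWitness_orderSeating : List Int := [3, 4, 5, 2, 0, 1, 12]

def Spec_orderSeating (seating : List Int) (out : List Int) : Prop := out = orderSeating_alt seating
instance (seating : List Int) (out : List Int) : Decidable (Spec_orderSeating seating out) := by unfold Spec_orderSeating; infer_instance

-- ===== CLAIM (what is proved, stated in full; the proofs are below) =====
def Claim_equal_orderSeating : Prop := ∀ (seating : List Int), Dom_orderSeating seating → Pre_orderSeating seating → Spec_orderSeating seating (orderSeating seating)

-- ===== LEMMAS AND PROOFS =====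

-- the three rank buckets of a list, concatenated
def bucketF (p : List Int) : List Int :=
  p.filter (fun x => decide (rankB x = 0)) ++ p.filter (fun x => decide (rankB x = 1))
    ++ p.filter (fun x => decide (rankB x = 2))

theorem rankB_cases (x : Int) : rankB x = 0 ∨ rankB x = 1 ∨ rankB x = 2 := by
  unfold rankB; split_ifs <;> simp

theorem insertBy_skip {α : Type} (before : α → α → Bool) (x : α) (as bs : List α)
    (h : ∀ y ∈ as, before x y = false) :
    PySem.List.insertBy before x (as ++ bs) = as ++ PySem.List.insertBy before x bs := by
  induction as with
  | nil => simp
  | cons a as ih =>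
    simp only [List.cons_append, PySem.List.insertBy, h a (by simp), if_neg Bool.false_ne_true,
      ih (fun y hy => h y (by simp [hy]))]

theorem insertBy_front {α : Type} (before : α → α → Bool) (x : α) (bs : List α)
    (h : ∀ y ∈ bs, before x y = true) :
    PySem.List.insertBy before x bs = x :: bs := by
  cases bs with
  | nil => simp [PySem.List.insertBy]
  | cons b bs => simp [PySem.List.insertBy, h b (by simp)]

theorem step_insert (p : List Int) (x : Int) :
    PySem.List.insertBy (fun a b => decide (rankB a < rankB b)) x (bucketF p)
      = bucketF (p ++ [x]) := by
  have hm0 : ∀ y ∈ p.filter (fun x => decide (rankB x = 0)), rankB y = 0 := by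
    intro y hy; simpa using (List.of_mem_filter hy)
  have hm1 : ∀ y ∈ p.filter (fun x => decide (rankB x = 1)), rankB y = 1 := by
    intro y hy; simpa using (List.of_mem_filter hy)
  have hm2 : ∀ y ∈ p.filter (fun x => decide (rankB x = 2)), rankB y = 2 := by
    intro y hy; simpa using (List.of_mem_filter hy)
  rcases rankB_cases x with hx | hx | hx
  · -- rank 0: inserted after bucket 0, in front of buckets 1 and 2
    unfold bucketF
    rw [List.append_assoc, insertBy_skip _ x _ _ (by intro y hy; simp [hm0 y hy, hx]),
        insertBy_front _ x _ (by
          intro y hy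
          rcases List.mem_append.mp hy with hy | hy
          · simp [hm1 y hy, hx]
          · simp [hm2 y hy, hx])]
    simp [List.filter_append, hx]
  · -- rank 1: after buckets 0 and 1, in front of bucket 2
    unfold bucketF
    rw [insertBy_skip _ x _ _ (by
          intro y hy
          rcases List.mem_append.mp hy with hy | hy
          · simp [hm0 y hy, hx]
          · simp [hm1 y hy, hx]),
        insertBy_front _ x _ (by intro y hy; simp [hm2 y hy, hx])]
    simp [List.filter_append, hx]
  · -- rank 2: appended at the very end
    unfold bucketF
    rw [← List.append_nil (List.filter _ p ++ List.filter _ p ++ List.filter _ p),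
        insertBy_skip _ x _ [] (by
          intro y hy
          rcases List.mem_append.mp hy with hy | hy
          · rcases List.mem_append.mp hy with hy | hy
            · simp [hm0 y hy, hx]
            · simp [hm1 y hy, hx]
          · simp [hm2 y hy, hx])]
    simp [PySem.List.insertBy, List.filter_append, hx]

theorem foldl_insert_bucket (xs : List Int) : ∀ p : List Int,
    List.foldl (fun acc x => PySem.List.insertBy (fun a b => decide (rankB a < rankB b)) x acc)
      (bucketF p) xs = bucketF (p ++ xs) := by
  induction xs with
  | nil => intro p; simp
  | cons x xs ih =>
    intro p
    simp only [List.foldl_cons, step_insert p x, ih (p ++ [x]), List.append_assoc,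
      List.singleton_append]

theorem alt_eq_bucket (seating : List Int) : orderSeating_alt seating = bucketF seating := by
  unfold orderSeating_alt
  rw [PySem.List.sorted_eq_foldl_insertBy]
  have := foldl_insert_bucket seating []
  simpa [bucketF] using this

theorem a_loop_bucket (xs : List Int) : ∀ p : List Int,
    List.foldl
      (fun (acc : List Int × List Int × List Int) id =>
        if isPrimeA id = 1 then (acc.1 ++ [id], acc.2.1, acc.2.2)
        else if isPowerOfTwoA id = 0 ∧ id ≠ 2 then (acc.1, acc.2.1 ++ [id], acc.2.2)
        else (acc.1, acc.2.1, acc.2.2 ++ [id]))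
      (p.filter (fun x => decide (rankB x = 0)), p.filter (fun x => decide (rankB x = 1)),
        p.filter (fun x => decide (rankB x = 2))) xs
    = ((p ++ xs).filter (fun x => decide (rankB x = 0)),
       (p ++ xs).filter (fun x => decide (rankB x = 1)),
       (p ++ xs).filter (fun x => decide (rankB x = 2))) := by
  induction xs with
  | nil => intro p; simp
  | cons x xs ih =>
    intro p
    have hstep :
        (if isPrimeA x = 1 then
            (p.filter (fun x => decide (rankB x = 0)) ++ [x], p.filter (fun x => decide (rankB x = 1)),
              p.filter (fun x => decide (rankB x = 2)))
          else if isPowerOfTwoA x = 0 ∧ x ≠ 2 then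
            (p.filter (fun x => decide (rankB x = 0)), p.filter (fun x => decide (rankB x = 1)) ++ [x],
              p.filter (fun x => decide (rankB x = 2)))
          else
            (p.filter (fun x => decide (rankB x = 0)), p.filter (fun x => decide (rankB x = 1)),
              p.filter (fun x => decide (rankB x = 2)) ++ [x]))
        = ((p ++ [x]).filter (fun x => decide (rankB x = 0)),
           (p ++ [x]).filter (fun x => decide (rankB x = 1)),
           (p ++ [x]).filter (fun x => decide (rankB x = 2))) := by
      by_cases h1 : isPrimeA x = 1
      · have hr : rankB x = 0 := by simp [rankB, h1]
        simp [h1, List.filter_append, hr]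
      · by_cases h2 : isPowerOfTwoA x = 0 ∧ x ≠ 2
        · have hr : rankB x = 1 := by simp [rankB, h1, h2]
          simp [h1, h2, List.filter_append, hr]
        · have hr : rankB x = 2 := by simp [rankB, h1, h2]
          simp [h1, h2, List.filter_append, hr]
    simp only [List.foldl_cons, hstep, ih (p ++ [x]), List.append_assoc, List.singleton_append]

theorem a_eq_bucket (seating : List Int) : orderSeating seating = bucketF seating := by
  unfold orderSeating
  have := a_loop_bucket seating []
  simp only [List.filter_nil, List.nil_append] at this
  simp [this, bucketF]

-- ===== VERDICT (by name: the statement is the Claim_ definition above) =====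
theorem orderSeating_spec : Claim_equal_orderSeating := by
  intro seating _ _
  unfold Spec_orderSeating
  rw [a_eq_bucket, alt_eq_bucket]
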